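-- pv_equiv track=rewrite | github.com/djankovik/NLP-Project | dealWithNER.py | get_tweetnerlists_onehots_intarray
-- ===== SOURCE A (Python) =====
-- def get_tweetnerlists_onehots_intarray(tweets_ner_lists,vocabulary, padtosize=12,padwith=0):
--     tweets_onehots = []
--     for tweet in tweets_ner_lists:
--         tweet_onehot = []
--         for nn in tweet:
--             if len(tweet_onehot) < padtosize:
--                 if nn in vocabulary:
--                     tweet_onehot.append(vocabulary.index(nn))
--                 else:
--                     tweet_onehot.append(0)
--         while len(tweet_onehot) < padtosize:
--             tweet_onehot.append(0)
--         tweets_onehots.append(tweet_onehot)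
--     return tweets_onehots
-- ===== SOURCE B (Python) =====
-- def get_tweetnerlists_onehots_intarray(tweets_ner_lists, vocabulary, padtosize=12, padwith=0):
--     k = max(padtosize, 0)
--     pad = [0] * k
--     def encode(tweet):
--         mapped = [vocabulary.index(nn) if nn in vocabulary else 0 for nn in tweet]
--         return (mapped + pad)[:k]
--     return [encode(tweet) for tweet in tweets_ner_lists]
-- ===== Notes on version B (the rewrite author's own statement) =====
-- stated objective: alternative
-- what changed: Replaces A's single guarded append loop plus trailing while-padding by a staged map-pad-truncate pipeline: map every token of the tweet to its vocabulary code, concatenate a precomputed zero pad block, and slice the result to the pad length.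
import Mathlib
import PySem

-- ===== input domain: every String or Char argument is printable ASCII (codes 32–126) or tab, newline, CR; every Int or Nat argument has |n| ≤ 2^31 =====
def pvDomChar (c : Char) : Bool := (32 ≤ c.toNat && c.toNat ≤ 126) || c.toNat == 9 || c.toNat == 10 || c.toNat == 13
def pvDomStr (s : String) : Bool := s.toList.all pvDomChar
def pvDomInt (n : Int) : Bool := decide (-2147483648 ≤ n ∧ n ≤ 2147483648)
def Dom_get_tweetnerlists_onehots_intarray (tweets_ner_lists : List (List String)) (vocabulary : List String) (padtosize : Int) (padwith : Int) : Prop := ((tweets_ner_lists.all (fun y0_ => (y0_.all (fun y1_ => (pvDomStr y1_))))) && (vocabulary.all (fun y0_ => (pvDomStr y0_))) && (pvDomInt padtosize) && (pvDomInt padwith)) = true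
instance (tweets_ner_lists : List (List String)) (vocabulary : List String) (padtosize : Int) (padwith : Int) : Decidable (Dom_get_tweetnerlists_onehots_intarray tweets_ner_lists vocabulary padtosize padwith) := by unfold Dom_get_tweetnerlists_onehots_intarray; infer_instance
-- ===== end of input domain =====

-- B replaces A's guarded append loop + trailing while-padding by a staged map-pad-truncate
-- pipeline (map every token, append a pad block, slice to length); alternative decomposition.
-- (Like A, B ignores the `padwith` parameter: padding is 0, as in the original.)

-- ===== PORT A =====
-- the trailing `while len(tweet_onehot) < padtosize: tweet_onehot.append(0)` loop
def pvPadLoop (r : List Int) (p : Int) : List Int :=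
  if h : (r.length : Int) < p then pvPadLoop (r ++ [(0 : Int)]) p else r
termination_by (p - (r.length : Int)).toNat
decreasing_by simp only [List.length_append, List.length_cons, List.length_nil]; omega

def get_tweetnerlists_onehots_intarray (tweets_ner_lists : List (List String)) (vocabulary : List String) (padtosize : Int) (padwith : Int) : List (List Int) :=
  tweets_ner_lists.foldl (fun tweets_onehots tweet =>
    let tweet_onehot := tweet.foldl (fun tweet_onehot nn =>
      if (tweet_onehot.length : Int) < padtosize then
        if vocabulary.contains nn then
          tweet_onehot ++ [(((PySem.List.index? vocabulary nn).getD 0 : Nat) : Int)]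
        else
          tweet_onehot ++ [(0 : Int)]
      else tweet_onehot) []
    tweets_onehots ++ [pvPadLoop tweet_onehot padtosize]) []

-- ===== PORT B =====
-- k = max(padtosize, 0); pad = [0]*k;
-- encode(tweet) = ([vocabulary.index(nn) if nn in vocabulary else 0 for nn in tweet] + pad)[:k]
-- the slice [:k] with k ≥ 0 is exactly List.take k.toNat
def get_tweetnerlists_onehots_intarray_alt (tweets_ner_lists : List (List String)) (vocabulary : List String) (padtosize : Int) (padwith : Int) : List (List Int) :=
  let k := max padtosize 0
  let pad : List Int := List.replicate k.toNat 0
  tweets_ner_lists.map (fun tweet =>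
    let mapped := tweet.map (fun nn =>
      if vocabulary.contains nn then (((PySem.List.index? vocabulary nn).getD 0 : Nat) : Int) else 0)
    (mapped ++ pad).take k.toNat)

-- ===== PRECONDITION & SPEC =====
def Spec_get_tweetnerlists_onehots_intarray (tweets_ner_lists : List (List String)) (vocabulary : List String) (padtosize : Int) (padwith : Int) (out : List (List Int)) : Prop := out = get_tweetnerlists_onehots_intarray_alt tweets_ner_lists vocabulary padtosize padwith
instance (tweets_ner_lists : List (List String)) (vocabulary : List String) (padtosize : Int) (padwith : Int) (out : List (List Int)) : Decidable (Spec_get_tweetnerlists_onehots_intarray tweets_ner_lists vocabulary padtosize padwith out) := by unfold Spec_get_tweetnerlists_onehots_intarray; infer_instance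

-- ===== CLAIM (what is proved, stated in full; the proofs are below) =====
def Claim_equal_get_tweetnerlists_onehots_intarray : Prop := ∀ (tweets_ner_lists : List (List String)) (vocabulary : List String) (padtosize : Int) (padwith : Int), Dom_get_tweetnerlists_onehots_intarray tweets_ner_lists vocabulary padtosize padwith → Spec_get_tweetnerlists_onehots_intarray tweets_ner_lists vocabulary padtosize padwith (get_tweetnerlists_onehots_intarray tweets_ner_lists vocabulary padtosize padwith)

-- ===== LEMMAS AND PROOFS =====

-- value both programs produce for a token nn
def pvVv (vocab : List String) (nn : String) : Int :=
  if vocab.contains nn then (((PySem.List.index? vocab nn).getD 0 : Nat) : Int) else 0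

lemma pv_foldA_eq (vocab : List String) (p : Int) (t : List String) :
    ∀ r : List Int,
      t.foldl (fun tweet_onehot nn =>
        if (tweet_onehot.length : Int) < p then
          if vocab.contains nn then
            tweet_onehot ++ [(((PySem.List.index? vocab nn).getD 0 : Nat) : Int)]
          else tweet_onehot ++ [(0 : Int)]
        else tweet_onehot) r
      = r ++ (t.take (p.toNat - r.length)).map (pvVv vocab) := by
  induction t with
  | nil => intro r; simp
  | cons nn t ih =>
    intro r
    by_cases h : (r.length : Int) < p
    · have hlt : r.length < p.toNat := by omega
      have hstep : (if vocab.contains nn then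
            r ++ [(((PySem.List.index? vocab nn).getD 0 : Nat) : Int)]
          else r ++ [(0 : Int)]) = r ++ [pvVv vocab nn] := by
        unfold pvVv; split_ifs <;> rfl
      simp only [List.foldl_cons, if_pos h, hstep, ih]
      have htake : (nn :: t).take (p.toNat - r.length)
          = nn :: t.take (p.toNat - (r.length + 1)) := by
        have : p.toNat - r.length = (p.toNat - (r.length + 1)) + 1 := by omega
        rw [this, List.take_succ_cons]
      simp [htake, List.append_assoc]
    · have h0 : p.toNat - r.length = 0 := by omega
      rw [List.foldl_cons, if_neg h, ih r, h0]
      simp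

lemma pv_padLoop_eq (p : Int) :
    ∀ (k : Nat) (r : List Int), p.toNat - r.length = k →
      pvPadLoop r p = r ++ List.replicate k 0 := by
  intro k
  induction k with
  | zero =>
    intro r hk
    have h : ¬ ((r.length : Int) < p) := by omega
    rw [pvPadLoop, dif_neg h]; simp
  | succ k ih =>
    intro r hk
    have h : (r.length : Int) < p := by omega
    rw [pvPadLoop, dif_pos h, ih (r ++ [0]) (by simp; omega)]
    simp [List.replicate_succ, List.append_assoc]

lemma pv_row_eq (vocab tweet : List String) (p : Int) :
    pvPadLoop (tweet.foldl (fun tweet_onehot nn =>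
        if (tweet_onehot.length : Int) < p then
          if vocab.contains nn then
            tweet_onehot ++ [(((PySem.List.index? vocab nn).getD 0 : Nat) : Int)]
          else tweet_onehot ++ [(0 : Int)]
        else tweet_onehot) []) p
    = (tweet.map (fun nn =>
        if vocab.contains nn then (((PySem.List.index? vocab nn).getD 0 : Nat) : Int) else 0)
        ++ List.replicate (max p 0).toNat 0).take (max p 0).toNat := by
  have hk : (max p 0).toNat = p.toNat := by omega
  rw [pv_foldA_eq vocab p tweet []]
  simp only [List.length_nil, Nat.sub_zero, List.nil_append]
  rw [pv_padLoop_eq p (p.toNat - ((tweet.take p.toNat).map (pvVv vocab)).length) _ rfl]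
  have hmap : tweet.map (fun nn =>
      if vocab.contains nn then (((PySem.List.index? vocab nn).getD 0 : Nat) : Int) else 0)
      = tweet.map (pvVv vocab) := by
    apply List.map_congr_left; intro nn _; unfold pvVv; rfl
  rw [hk, hmap, List.take_append, ← List.map_take, List.take_replicate]
  simp only [List.length_map, List.length_take]
  have : min (p.toNat - tweet.length) p.toNat = p.toNat - min p.toNat tweet.length := by omega
  rw [this]

-- ===== VERDICT (by name: the statement is the Claim_ definition above) =====
theorem get_tweetnerlists_onehots_intarray_spec : Claim_equal_get_tweetnerlists_onehots_intarray := by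
  intro tweets vocab p w hd
  clear hd
  unfold Spec_get_tweetnerlists_onehots_intarray
  unfold get_tweetnerlists_onehots_intarray get_tweetnerlists_onehots_intarray_alt
  induction tweets using List.reverseRecOn with
  | nil => rfl
  | append_singleton ts t ih =>
    rw [List.foldl_append, List.map_append, ← ih]
    simp only [List.foldl_cons, List.foldl_nil, List.map_cons, List.map_nil]
    rw [pv_row_eq vocab t p]
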